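-- pv_equiv track=rewrite | github.com/jaehyek/emmcPyWifi | ksumsleep.py | makeDictDictCountToOrderedList
-- ===== SOURCE A (Python) =====
-- from collections import OrderedDict
--
-- def makeDictDictCountToOrderedList(dictdictcount):
--     dictcount = {}
--     for itemkey in dictdictcount :
--         dicttemp = dictdictcount.get(itemkey)
--         dictcount[itemkey] = dicttemp["count"]
--
--     odictfailcount = OrderedDict(sorted(dictcount.items(), key=lambda t: t[0]))
--
--     strret = []
--     for itemkey in odictfailcount :
--         count = odictfailcount.get(itemkey)
--         strret += [itemkey, str(count)]
--
--     return strret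
-- ===== SOURCE B (Python) =====
-- def makeDictDictCountToOrderedList(dictdictcount):
--     # selection loop: repeatedly pop the smallest remaining key; no sort, no OrderedDict
--     remaining = dict(dictdictcount)
--     strret = []
--     while remaining:
--         key = min(remaining)
--         strret.append(key)
--         strret.append(str(remaining.pop(key)["count"]))
--     return strret
-- ===== Notes on version B (the rewrite author's own statement) =====
-- stated objective: alternative
-- what changed: Replaces A's staged pipeline (build a count dict, sort its items, construct an OrderedDict, then iterate it) by a destructive selection loop: copy the dict and repeatedly pop the minimum remaining key, emitting key and str(count) as it goes; no sort call and no intermediate containers.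
import Mathlib
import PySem

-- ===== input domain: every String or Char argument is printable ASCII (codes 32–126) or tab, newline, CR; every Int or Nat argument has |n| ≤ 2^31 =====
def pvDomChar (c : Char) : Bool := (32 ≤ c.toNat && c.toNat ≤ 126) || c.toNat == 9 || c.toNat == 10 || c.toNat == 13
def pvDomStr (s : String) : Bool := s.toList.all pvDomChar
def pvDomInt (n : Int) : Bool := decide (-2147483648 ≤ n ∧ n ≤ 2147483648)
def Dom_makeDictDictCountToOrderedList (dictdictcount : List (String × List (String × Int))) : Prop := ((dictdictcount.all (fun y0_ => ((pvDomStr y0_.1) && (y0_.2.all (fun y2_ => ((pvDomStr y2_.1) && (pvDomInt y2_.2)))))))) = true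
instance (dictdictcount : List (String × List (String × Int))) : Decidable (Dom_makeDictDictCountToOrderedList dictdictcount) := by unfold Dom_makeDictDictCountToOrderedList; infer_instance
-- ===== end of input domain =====

-- B replaces A's sort-plus-OrderedDict pipeline by a selection loop that repeatedly pops the minimum remaining key (objective: alternative).

-- ===== PORT A =====
def makeDictDictCountToOrderedList (dictdictcount : List (String × List (String × Int))) : List String :=
  let d := PySem.Dict.ofList dictdictcount
  -- dictcount = {}; for itemkey in dictdictcount: dictcount[itemkey] = dictdictcount.get(itemkey)["count"]
  let dictcount : PySem.Dict String Int :=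
    d.keys.foldl (fun dc itemkey =>
      let dicttemp := PySem.Dict.ofList ((d.get? itemkey).getD [])
      dc.insert itemkey (dicttemp.getD "count" 0)) PySem.Dict.empty   -- getD 0: Python raises KeyError there (outside Pre_)
  -- odictfailcount = OrderedDict(sorted(dictcount.items(), key=lambda t: t[0]))
  let odict := PySem.Dict.mk (PySem.List.sorted dictcount.items (fun t => t.1) false)
  -- strret loop
  odict.keys.foldl (fun strret itemkey =>
    strret ++ [itemkey, PySem.Int.toStr ((odict.get? itemkey).getD 0)]) []

-- ===== PORT B =====
-- 'while remaining: key = min(remaining); strret.append(key); strret.append(str(remaining.pop(key)["count"]))'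
-- pop = read the value (get?) then erase the key; min over a dict iterates its keys.
def pvSelLoop (remaining : PySem.Dict String (List (String × Int))) (strret : List String) : List String :=
  match h : PySem.List.min? remaining.keys (fun k => k) with
  | none => strret
  | some key =>
      pvSelLoop (remaining.erase key)
        (strret ++ [key, PySem.Int.toStr ((PySem.Dict.ofList ((remaining.get? key).getD [])).getD "count" 0)])
termination_by remaining.items.length
decreasing_by
  have hk : key ∈ remaining.keys := PySem.List.min?_mem h
  have : ∃ p ∈ remaining.items, ¬ (!p.1 == key) = true := by
    rcases List.mem_map.mp hk with ⟨p, hp, hpk⟩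
    exact ⟨p, hp, by simp [hpk]⟩
  simpa [PySem.Dict.erase] using List.length_filter_lt_length_iff_exists.mpr this

def makeDictDictCountToOrderedList_alt (dictdictcount : List (String × List (String × Int))) : List String :=
  pvSelLoop (PySem.Dict.ofList dictdictcount) []

-- ===== PRECONDITION & SPEC =====
-- Pre_ excludes exactly the inputs on which Python A raises KeyError: some inner dict has no "count" key.
def Pre_makeDictDictCountToOrderedList (dictdictcount : List (String × List (String × Int))) : Prop :=
  ∀ p ∈ (PySem.Dict.ofList dictdictcount).items, ((p.2.map Prod.fst).contains "count") = true
instance (dictdictcount : List (String × List (String × Int))) : Decidable (Pre_makeDictDictCountToOrderedList dictdictcount) := by unfold Pre_makeDictDictCountToOrderedList; infer_instance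
def pvWitness_makeDictDictCountToOrderedList : (List (String × List (String × Int))) := [("b", [("count", 2)]), ("a", [("count", 7), ("x", 1)])]
def Spec_makeDictDictCountToOrderedList (dictdictcount : List (String × List (String × Int))) (out : List String) : Prop := out = makeDictDictCountToOrderedList_alt dictdictcount
instance (dictdictcount : List (String × List (String × Int))) (out : List String) : Decidable (Spec_makeDictDictCountToOrderedList dictdictcount out) := by unfold Spec_makeDictDictCountToOrderedList; infer_instance

-- ===== CLAIM (what is proved, stated in full; the proofs are below) =====
def Claim_equal_makeDictDictCountToOrderedList : Prop := ∀ (dictdictcount : List (String × List (String × Int))), Dom_makeDictDictCountToOrderedList dictdictcount → Pre_makeDictDictCountToOrderedList dictdictcount → Spec_makeDictDictCountToOrderedList dictdictcount (makeDictDictCountToOrderedList dictdictcount)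

-- ===== LEMMAS AND PROOFS =====

-- first-match lookup in a dict literally made of distinct (k, f k) pairs
theorem pv_get?_mk_map {f : String → Int} {ks : List String} (hnd : ks.Nodup)
    {k : String} (hk : k ∈ ks) :
    (PySem.Dict.mk (ks.map (fun k => (k, f k)))).get? k = some (f k) := by
  induction ks with
  | nil => cases hk
  | cons a t ih =>
      rw [List.map_cons, PySem.Dict.get?_mk_cons]
      rcases List.mem_cons.mp hk with h | h
      · subst h; simp
      · have hne : (a == k) = false := by
          simp only [beq_eq_false_iff_ne]
          rintro rfl; exact (List.nodup_cons.mp hnd).1 h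
        rw [hne]; simp only [Bool.false_eq_true, if_false]
        exact ih (List.nodup_cons.mp hnd).2 h

-- erasing one key does not change the lookup of another (pure first-match fact, no Nodup needed)
theorem pv_get?_erase_of_ne {ν : Type} (d : PySem.Dict String ν) {k k' : String} (hne : k' ≠ k) :
    (d.erase k).get? k' = d.get? k' := by
  obtain ⟨l⟩ := d
  induction l with
  | nil => rfl
  | cons p t ih =>
      obtain ⟨a, v⟩ := p
      by_cases hak : a = k
      · subst hak
        have h2 : (a == k') = false := beq_eq_false_iff_ne.mpr (Ne.symm hne)
        simpa [PySem.Dict.erase, List.filter_cons, PySem.Dict.get?_mk_cons, h2] using ih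
      · have h1 : (a == k) = false := beq_eq_false_iff_ne.mpr hak
        by_cases hak' : a = k'
        · subst hak'
          simp [PySem.Dict.erase, h1, PySem.Dict.get?_mk_cons]
        · have h2 : (a == k') = false := beq_eq_false_iff_ne.mpr hak'
          simpa [PySem.Dict.erase, List.filter_cons, h1, h2, PySem.Dict.get?_mk_cons] using ih

theorem pv_keys_erase {ν : Type} (d : PySem.Dict String ν) (k : String) :
    (d.erase k).keys = d.keys.filter (fun x => !(x == k)) := by
  obtain ⟨l⟩ := d
  induction l with
  | nil => rfl
  | cons p t ih =>
      by_cases hpk : (p.1 == k) = true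
      · simpa [PySem.Dict.erase, PySem.Dict.keys, List.filter_cons, hpk] using ih
      · simp only [Bool.not_eq_true] at hpk
        simpa [PySem.Dict.erase, PySem.Dict.keys, List.filter_cons, hpk] using ih

-- the selection loop emits exactly the sorted-key flattening of the current dict
theorem pv_selLoop_eq (d : PySem.Dict String (List (String × Int))) (out : List String) :
    d.keys.Nodup →
    pvSelLoop d out = out ++ (PySem.List.sorted d.keys (fun k => k) false).flatMap
      (fun k => [k, PySem.Int.toStr ((PySem.Dict.ofList ((d.get? k).getD [])).getD "count" 0)]) := by
  fun_induction pvSelLoop d out with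
  | case1 d out h =>
      intro _
      have : d.keys = [] := (PySem.List.min?_eq_none_iff _ _).mp h
      simp [this, PySem.List.sorted]
  | case2 d out key h ih =>
      intro hnd
      have hk : key ∈ d.keys := PySem.List.min?_mem h
      have hkeysE : (d.erase key).keys = d.keys.filter (fun x => !(x == key)) :=
        pv_keys_erase d key
      have hndE : (d.erase key).keys.Nodup := by
        rw [hkeysE]; exact hnd.filter _
      -- sorted d.keys = key :: sorted (keys minus key)
      have hfilter_eq : d.keys.filter (fun x => !(x == key)) = d.keys.erase key := by
        rw [hnd.erase_eq_filter key]
        exact List.filter_congr (fun x _ => by simp [bne])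
      have hsplit : PySem.List.sorted d.keys (fun k => k) false
          = key :: PySem.List.sorted ((d.erase key).keys) (fun k => k) false := by
        apply PySem.List.sorted_id_eq_of_perm_of_pairwise
        · refine List.Perm.trans ?_ (List.perm_cons_erase hk).symm
          exact List.Perm.cons _ (by rw [hkeysE, hfilter_eq]; exact PySem.List.sorted_perm _ _ _)
        · rw [List.pairwise_cons]
          refine ⟨?_, PySem.List.sorted_pairwise _ _⟩
          intro b hb
          have hbk : b ∈ d.keys := by
            have := (PySem.List.sorted_perm ((d.erase key).keys) (fun k => k) false).mem_iff.mp hb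
            rw [hkeysE] at this
            exact List.mem_of_mem_filter this
          exact PySem.List.min?_isMin h b hbk
      have hg : ∀ x ∈ PySem.List.sorted ((d.erase key).keys) (fun k => k) false,
          (fun k => [k, PySem.Int.toStr ((PySem.Dict.ofList (((d.erase key).get? k).getD [])).getD "count" 0)]) x
            = (fun k => [k, PySem.Int.toStr ((PySem.Dict.ofList ((d.get? k).getD [])).getD "count" 0)]) x := by
        intro x hx
        have hxk : x ≠ key := by
          have := (PySem.List.sorted_perm ((d.erase key).keys) (fun k => k) false).mem_iff.mp hx
          rw [hkeysE] at this
          have := List.of_mem_filter this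
          simpa using this
        simp only [pv_get?_erase_of_ne d hxk]
      rw [ih hndE, hsplit, List.flatMap_cons, List.flatMap_congr hg]
      simp [List.append_assoc]

theorem pv_main (l : List (String × List (String × Int))) :
    makeDictDictCountToOrderedList l = makeDictDictCountToOrderedList_alt l := by
  unfold makeDictDictCountToOrderedList makeDictDictCountToOrderedList_alt
  simp only []
  set d := PySem.Dict.ofList l with hd
  set f : String → Int := fun k => (PySem.Dict.ofList ((d.get? k).getD [])).getD "count" 0 with hf
  have hnd : d.keys.Nodup := PySem.Dict.nodup_keys_ofList l
  -- the first loop inserts distinct fresh keys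
  have hitems :
      (d.keys.foldl (fun dc itemkey => dc.insert itemkey (f itemkey)) PySem.Dict.empty).items
        = d.keys.map (fun k => (k, f k)) := by
    have := PySem.Dict.items_foldl_insert_fresh (l := d.keys) (k := fun x => x) (v := f)
      (d := PySem.Dict.empty)
      (by intro a _; exact PySem.Dict.contains_empty a)
      (by simpa using hnd)
    simpa using this
  rw [hitems]
  -- sorting the (k, f k) pairs by fst = mapping over the sorted keys
  set ks := PySem.List.sorted d.keys (fun k => k) false with hks
  have hknd : ks.Nodup := ((PySem.List.sorted_perm d.keys (fun k => k) false).nodup_iff).mpr hnd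
  have hsorted :
      PySem.List.sorted (d.keys.map (fun k => (k, f k))) (fun t => t.1) false
        = ks.map (fun k => (k, f k)) := by
    apply PySem.List.sorted_eq_of_perm_of_pairwise_lt
    · exact (PySem.List.sorted_perm d.keys (fun k => k) false).map _
    · have hle : ks.Pairwise (fun a b => a ≤ b) := PySem.List.sorted_pairwise d.keys (fun k => k)
      have hlt : ks.Pairwise (fun a b => a < b) := by
        have := hle.and (List.nodup_iff_pairwise_ne.mp hknd)
        exact this.imp (fun h => lt_of_le_of_ne h.1 h.2)
      rw [List.pairwise_map]
      exact hlt
  rw [hsorted]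
  -- keys of the ordered dict are the sorted keys
  have hkeys : (PySem.Dict.mk (ks.map (fun k => (k, f k)))).keys = ks := by
    simp [PySem.Dict.keys_mk, Function.comp_def]
  rw [hkeys]
  -- lookups in the ordered dict give back f k; then compare with the selection loop's output
  rw [PySem.List.foldl_congr_mem' ks _
        (fun strret itemkey => strret ++ [itemkey, PySem.Int.toStr (f itemkey)]) []
        (fun k hk acc => by rw [pv_get?_mk_map hknd hk]; rfl)]
  rw [PySem.List.foldl_append_eq_flatMap]
  rw [pv_selLoop_eq d [] hnd]

-- ===== VERDICT (by name: the statement is the Claim_ definition above) =====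
theorem makeDictDictCountToOrderedList_spec : Claim_equal_makeDictDictCountToOrderedList := by
  intro l _ _
  exact pv_main l
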